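-- pv_equiv track=rewrite | github.com/maelic13/advent-of-code | python/year2023/day12.py | _get_replaced
-- ===== SOURCE A (Python) =====
-- def _get_replaced(springs: list[str], attempt: tuple[str]) -> list[str]:
--     to_use_index = 0
--     spring_variation: list[str] = []
--
--     for spring in springs:
--         if spring == "?":
--             spring_variation.append(attempt[to_use_index])
--             to_use_index += 1
--             continue
--         spring_variation.append(spring)
--
--     return spring_variation
-- ===== SOURCE B (Python) =====
-- def _get_replaced(springs: list[str], attempt: tuple[str]) -> list[str]:
--     qpos = [i for i, s in enumerate(springs) if s == "?"]
--     result = list(springs)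
--     for j, pos in enumerate(qpos):
--         result[pos] = attempt[j]
--     return result
-- ===== Notes on version B (the rewrite author's own statement) =====
-- stated objective: alternative
-- what changed: B first builds an index table of the '?' positions, then copies the list and assigns attempt[j] at the j-th '?' position, instead of A's single accumulating pass with a running counter.
import Mathlib
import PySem

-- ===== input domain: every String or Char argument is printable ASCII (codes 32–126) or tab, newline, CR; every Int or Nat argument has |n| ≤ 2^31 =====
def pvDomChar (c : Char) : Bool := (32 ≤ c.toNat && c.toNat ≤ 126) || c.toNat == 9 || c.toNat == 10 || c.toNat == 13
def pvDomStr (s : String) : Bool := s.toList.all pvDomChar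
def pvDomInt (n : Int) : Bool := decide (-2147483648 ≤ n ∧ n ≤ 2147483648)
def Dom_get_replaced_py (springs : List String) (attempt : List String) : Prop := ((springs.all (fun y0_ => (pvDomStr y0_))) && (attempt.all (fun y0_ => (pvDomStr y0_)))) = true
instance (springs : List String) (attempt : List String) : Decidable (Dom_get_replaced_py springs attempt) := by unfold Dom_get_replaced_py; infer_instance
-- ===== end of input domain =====

-- B builds an index table of the '?' positions and assigns into a copy of springs, instead of A's single accumulating pass with a running counter; objective: alternative decomposition, same cost.


-- ===== PORT A =====
-- literal port of A: one pass with a running counter to_use_index and an accumulator list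
def get_replaced_py (springs : List String) (attempt : List String) : List String :=
  (springs.foldl
    (fun (st : Int × List String) spring =>
      if spring = "?" then (st.1 + 1, st.2 ++ [PySem.List.pyGetD attempt st.1 ""])
      else (st.1, st.2 ++ [spring]))
    ((0 : Int), ([] : List String))).2

-- ===== PORT B =====
-- literal port of B: collect the '?' positions, then assign attempt[j] at the j-th position into a copy
def get_replaced_py_alt (springs : List String) (attempt : List String) : List String :=
  let qpos : List Int :=
    ((PySem.List.enumerate springs 0).filter (fun p => p.2 == "?")).map (·.1)
  (PySem.List.enumerate qpos 0).foldl
    (fun res jp => PySem.List.pySetD res jp.2 (PySem.List.pyGetD attempt jp.1 "")) springs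

-- ===== PRECONDITION & SPEC =====
-- Pre_ excludes exactly the inputs where attempt has fewer elements than springs has "?"s:
-- there both Pythons raise IndexError.
def Pre_get_replaced_py (springs : List String) (attempt : List String) : Prop :=
  springs.count "?" ≤ attempt.length
instance (springs : List String) (attempt : List String) : Decidable (Pre_get_replaced_py springs attempt) := by unfold Pre_get_replaced_py; infer_instance
def pvWitness_get_replaced_py : List String × List String := (["?", ".", "#", "?"], ["a", "b"])
def Spec_get_replaced_py (springs : List String) (attempt : List String) (out : List String) : Prop := out = get_replaced_py_alt springs attempt
instance (springs : List String) (attempt : List String) (out : List String) : Decidable (Spec_get_replaced_py springs attempt out) := by unfold Spec_get_replaced_py; infer_instance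

-- ===== CLAIM (what is proved, stated in full; the proofs are below) =====
def Claim_equal_get_replaced_py : Prop := ∀ (springs : List String) (attempt : List String), Dom_get_replaced_py springs attempt → Pre_get_replaced_py springs attempt → Spec_get_replaced_py springs attempt (get_replaced_py springs attempt)

-- ===== LEMMAS AND PROOFS =====

-- common reference: replace '?'s by attempt[i], attempt[i+1], …
def replSpec (ss att : List String) (i : Int) : List String :=
  match ss with
  | [] => []
  | s :: rest =>
    if s = "?" then PySem.List.pyGetD att i "" :: replSpec rest att (i + 1)
    else s :: replSpec rest att i

theorem a_fold (att : List String) :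
    ∀ (ss : List String) (k : Int) (acc : List String),
    (ss.foldl
      (fun (st : Int × List String) spring =>
        if spring = "?" then (st.1 + 1, st.2 ++ [PySem.List.pyGetD att st.1 ""])
        else (st.1, st.2 ++ [spring])) (k, acc)).2 = acc ++ replSpec ss att k := by
  intro ss
  induction ss with
  | nil => intro k acc; simp [replSpec]
  | cons s rest ih =>
    intro k acc
    by_cases hs : s = "?"
    · simp [List.foldl_cons, hs, replSpec, ih]
    · simp [List.foldl_cons, hs, replSpec, ih]

def qposOf (ss : List String) : List Int :=
  ((PySem.List.enumerate ss 0).filter (fun p => p.2 == "?")).map (·.1)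

theorem enum_shift {α : Type} : ∀ (xs : List α) (s : Int),
    PySem.List.enumerate xs (s + 1) = (PySem.List.enumerate xs s).map (fun p => (p.1 + 1, p.2)) := by
  intro xs
  induction xs with
  | nil => intro s; simp [PySem.List.enumerate_nil]
  | cons x rest ih =>
    intro s
    rw [PySem.List.enumerate_cons, PySem.List.enumerate_cons, List.map_cons, ← ih (s + 1)]

theorem qpos_cons (s : String) (rest : List String) :
    qposOf (s :: rest) =
      (if s = "?" then [(0 : Int)] else []) ++ (qposOf rest).map (· + 1) := by
  unfold qposOf
  rw [PySem.List.enumerate_cons]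
  rw [show (0 : Int) + 1 = 0 + 1 by ring, enum_shift rest 0]
  by_cases hs : s = "?" <;>
    simp [hs, List.filter_map, List.map_map, Function.comp_def]

theorem qpos_nonneg : ∀ (ss : List String), ∀ p ∈ qposOf ss, 0 ≤ p := by
  intro ss
  induction ss with
  | nil => intro p hp; simp [qposOf, PySem.List.enumerate_nil] at hp
  | cons s rest ih =>
    intro p hp
    rw [qpos_cons] at hp
    rcases List.mem_append.mp hp with h | h
    · by_cases hs : s = "?"
      · simp [hs] at h; omega
      · simp [hs] at h
    · rcases List.mem_map.mp h with ⟨q, hq, rfl⟩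
      have := ih q hq; omega

theorem enum_map {α β : Type} (f : α → β) : ∀ (xs : List α) (s : Int),
    PySem.List.enumerate (xs.map f) s = (PySem.List.enumerate xs s).map (fun p => (p.1, f p.2)) := by
  intro xs
  induction xs with
  | nil => intro s; simp [PySem.List.enumerate_nil]
  | cons x rest ih =>
    intro s
    rw [List.map_cons, PySem.List.enumerate_cons, PySem.List.enumerate_cons, List.map_cons, ih]

theorem pySetD_cons_succ {α : Type} (x : α) (res : List α) (p : Int) (hp : 0 ≤ p) (v : α) :
    PySem.List.pySetD (x :: res) (p + 1) v = x :: PySem.List.pySetD res p v := by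
  rw [PySem.List.pySetD_of_nonneg (x :: res) v (by omega), PySem.List.pySetD_of_nonneg res v hp]
  have htn : (p + 1).toNat = p.toNat + 1 := by omega
  rw [htn, List.set_cons_succ]

theorem fold_shift (att : List String) :
    ∀ (jps : List (Int × Int)), (∀ q ∈ jps, 0 ≤ q.2) → ∀ (x : String) (res : List String),
    (jps.map (fun q => (q.1, q.2 + 1))).foldl
        (fun res jp => PySem.List.pySetD res jp.2 (PySem.List.pyGetD att jp.1 "")) (x :: res)
      = x :: jps.foldl
        (fun res jp => PySem.List.pySetD res jp.2 (PySem.List.pyGetD att jp.1 "")) res := by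
  intro jps
  induction jps with
  | nil => intro _ x res; simp
  | cons q rest ih =>
    intro hnn x res
    have hq : 0 ≤ q.2 := hnn q (by simp)
    rw [List.map_cons, List.foldl_cons, List.foldl_cons]
    dsimp only
    rw [pySetD_cons_succ x res q.2 hq]
    exact ih (fun r hr => hnn r (by simp [hr])) x _

theorem b_fold (att : List String) :
    ∀ (ss : List String) (j0 : Int),
    (PySem.List.enumerate (qposOf ss) j0).foldl
        (fun res jp => PySem.List.pySetD res jp.2 (PySem.List.pyGetD att jp.1 "")) ss
      = replSpec ss att j0 := by
  intro ss
  induction ss with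
  | nil => intro j0; simp [qposOf, PySem.List.enumerate_nil, replSpec]
  | cons s rest ih =>
    intro j0
    rw [qpos_cons]
    by_cases hs : s = "?"
    · rw [if_pos hs, List.singleton_append, PySem.List.enumerate_cons, List.foldl_cons]
      subst hs
      rw [show PySem.List.pySetD ("?" :: rest) ((j0, (0:Int)).2) (PySem.List.pyGetD att (j0, (0:Int)).1 "")
            = PySem.List.pyGetD att j0 "" :: rest by
        rw [PySem.List.pySetD_of_nonneg ("?" :: rest) (PySem.List.pyGetD att (j0, (0:Int)).1 "") (by omega)]; rfl]
      rw [enum_map (· + 1)]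
      rw [fold_shift att _ (by
        intro q hq
        rcases (PySem.List.mem_enumerate_iff _ _ _).mp hq with ⟨k, hk, rfl⟩
        exact qpos_nonneg rest _ (by simp))]
      rw [ih (j0 + 1), replSpec, if_pos rfl]
    · rw [if_neg hs, List.nil_append, enum_map (· + 1)]
      rw [fold_shift att _ (by
        intro q hq
        rcases (PySem.List.mem_enumerate_iff _ _ _).mp hq with ⟨k, hk, rfl⟩
        exact qpos_nonneg rest _ (by simp))]
      rw [ih j0, replSpec, if_neg hs]

-- ===== VERDICT (by name: the statement is the Claim_ definition above) =====
theorem get_replaced_py_spec : Claim_equal_get_replaced_py := by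
  intro springs attempt _ _
  unfold Spec_get_replaced_py get_replaced_py get_replaced_py_alt
  rw [a_fold attempt springs 0 []]
  rw [show ((PySem.List.enumerate springs 0).filter (fun p => p.2 == "?")).map (·.1) = qposOf springs from rfl]
  rw [b_fold attempt springs 0]
  simp
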